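-- pv_equiv track=rewrite | github.com/basind/TUBES-DASPRO | helper.py | panjangMaksKolomTabel
-- ===== SOURCE A (Python) =====
-- def panjang(item):
--     # Helper panjang untuk mengecek panjang suatu item (list, string, dsb)
--
--     # KAMUS LOKAL
--     # counter : integer
--     # _ : iterator
--
--     # ALGORITMA
--     counter = 0
--     for _ in item:
--         counter += 1
--     return counter
--
-- def tambahArray(arr1, arr2):
--     # Melakukan merge arr1 dengan item. Item di merge di bagian belakang arr1
--
--     # KAMUS LOKAL
--
--     # ALGORITMA
--     return arr1 + arr2
--
-- def panjangMaksKolomTabel(data):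
--     # Menentukan panjang maksimum dari suatu kolom tabel data
--
--     # KAMUS LOKAL
--     # panjang_maksimum_kolom: array of integer
--     # i, maks_temp, j: integer
--
--     # ALGORITMA
--     panjang_maksimum_kolom = []
--     for i in range(panjang(data[0])):
--         maks_temp = 0
--         for j in range(panjang(data)):
--             if panjang(data[j][i]) > maks_temp:
--                 maks_temp = panjang(data[j][i])
--         panjang_maksimum_kolom = tambahArray(
--             panjang_maksimum_kolom, [maks_temp])
--     return panjang_maksimum_kolom
-- ===== SOURCE B (Python) =====
-- def panjangMaksKolomTabel(data):
--     # Single pass: maintain all column maxima simultaneously (one traversal of data).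
--     n = len(data[0])
--     result = [0] * n
--     for row in data:
--         result = [len(row[i]) if len(row[i]) > result[i] else result[i]
--                   for i in range(n)]
--     return result
-- ===== Notes on version B (the rewrite author's own statement) =====
-- stated objective: simpler
-- what changed: B makes a single pass over the rows maintaining all column maxima at once, instead of A's per-column rescan of every row via index loops; it uses the built-in len instead of A's counting-loop helper, which is the constant-factor speedup a timing run measured.
import Mathlib
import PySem

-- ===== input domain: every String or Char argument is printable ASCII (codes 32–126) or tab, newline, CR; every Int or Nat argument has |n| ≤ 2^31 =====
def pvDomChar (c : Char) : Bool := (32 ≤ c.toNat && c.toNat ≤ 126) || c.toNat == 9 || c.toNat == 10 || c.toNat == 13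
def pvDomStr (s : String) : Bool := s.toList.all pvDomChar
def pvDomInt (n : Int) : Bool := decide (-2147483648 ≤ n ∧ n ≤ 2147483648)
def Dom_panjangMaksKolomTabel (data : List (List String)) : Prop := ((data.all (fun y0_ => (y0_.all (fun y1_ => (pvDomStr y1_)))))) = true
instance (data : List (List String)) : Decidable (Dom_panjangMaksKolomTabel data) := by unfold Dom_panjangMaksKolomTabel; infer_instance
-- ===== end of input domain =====

-- B replaces A's per-column rescan of all rows by one pass over the rows that
-- maintains every column maximum at once (same O(r·c) work, simpler traversal).

-- ===== PORT A =====
-- helper 'panjang': counts elements of an iterable by a loop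
def pvPanjang {α : Type} (l : List α) : Int := List.foldl (fun c _ => c + 1) 0 l
-- 'panjang' applied to a string iterates its characters
def pvPanjangStr (s : String) : Int := pvPanjang s.toList
-- helper 'tambahArray': arr1 + arr2
def pvTambahArray {α : Type} (a b : List α) : List α := a ++ b

def panjangMaksKolomTabel (data : List (List String)) : List Int :=
  List.foldl
    (fun acc i =>
      pvTambahArray acc
        [List.foldl
          (fun m j =>
            if pvPanjangStr (PySem.List.pyGetD (PySem.List.pyGetD data j []) i "") > m
            then pvPanjangStr (PySem.List.pyGetD (PySem.List.pyGetD data j []) i "")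
            else m)
          0 (PySem.List.pyRange 0 (pvPanjang data))])
    [] (PySem.List.pyRange 0 (pvPanjang (PySem.List.pyGetD data 0 [])))

-- ===== PORT B =====
def panjangMaksKolomTabel_alt (data : List (List String)) : List Int :=
  let n : Nat := (PySem.List.pyGetD data 0 []).length
  List.foldl
    (fun res row =>
      (PySem.List.pyRange 0 (n : Int)).map (fun i =>
        if PySem.Str.len (PySem.List.pyGetD row i "") > PySem.List.pyGetD res i 0
        then PySem.Str.len (PySem.List.pyGetD row i "")
        else PySem.List.pyGetD res i 0))
    (List.replicate n 0) data

-- ===== PRECONDITION & SPEC =====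
-- Pre_ excludes exactly the inputs where Python A raises IndexError: empty data
-- (data[0]) and ragged data with some row shorter than the first (data[j][i]).
def Pre_panjangMaksKolomTabel (data : List (List String)) : Prop :=
  data ≠ [] ∧ ∀ row ∈ data, (PySem.List.pyGetD data 0 []).length ≤ row.length
instance (data : List (List String)) : Decidable (Pre_panjangMaksKolomTabel data) := by
  unfold Pre_panjangMaksKolomTabel; infer_instance

def pvWitness_panjangMaksKolomTabel : List (List String) := [["ab", "c"], ["d", "efg"]]

def Spec_panjangMaksKolomTabel (data : List (List String)) (out : List Int) : Prop := out = panjangMaksKolomTabel_alt data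
instance (data : List (List String)) (out : List Int) : Decidable (Spec_panjangMaksKolomTabel data out) := by unfold Spec_panjangMaksKolomTabel; infer_instance

-- ===== CLAIM (what is proved, stated in full; the proofs are below) =====
def Claim_equal_panjangMaksKolomTabel : Prop := ∀ (data : List (List String)), Dom_panjangMaksKolomTabel data → Pre_panjangMaksKolomTabel data → Spec_panjangMaksKolomTabel data (panjangMaksKolomTabel data)

-- ===== LEMMAS AND PROOFS =====

theorem pvWitness_ok :
    Dom_panjangMaksKolomTabel pvWitness_panjangMaksKolomTabel ∧
    Pre_panjangMaksKolomTabel pvWitness_panjangMaksKolomTabel := by decide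

theorem pvPanjang_eq {α : Type} (l : List α) : pvPanjang l = (l.length : Int) := by
  unfold pvPanjang
  rw [PySem.List.foldl_add (g := fun _ => (1 : Int)), PySem.List.sum_map_const_int]
  simp

theorem pvPanjangStr_eq (s : String) : pvPanjangStr s = PySem.Str.len s := by
  rw [pvPanjangStr, pvPanjang_eq, PySem.Str.len_eq]

-- the common column-maximum fold, started from an arbitrary accumulator
def pvColMax (rows : List (List String)) (i : Int) (init : Int) : Int :=
  List.foldl
    (fun m row =>
      if PySem.Str.len (PySem.List.pyGetD row i "") > m
      then PySem.Str.len (PySem.List.pyGetD row i "") else m)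
    init rows

theorem A_eq_map (data : List (List String)) :
    panjangMaksKolomTabel data =
      (PySem.List.pyRange 0 ((PySem.List.pyGetD data 0 []).length : Int)).map
        (fun i => pvColMax data i 0) := by
  unfold panjangMaksKolomTabel pvTambahArray
  rw [pvPanjang_eq (PySem.List.pyGetD data 0 []),
      PySem.List.foldl_append_singleton_eq_map]
  rw [List.nil_append]
  refine List.map_congr_left (fun i _ => ?_)
  rw [pvPanjang_eq data]
  rw [PySem.List.foldl_pyRange_zero_pyGetD' data []
        (f := fun m row =>
          if pvPanjangStr (PySem.List.pyGetD row i "") > m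
          then pvPanjangStr (PySem.List.pyGetD row i "") else m) 0]
  unfold pvColMax
  refine PySem.List.foldl_congr_mem _ _ _ _ (fun m row _ => ?_)
  rw [pvPanjangStr_eq]

theorem pyGetD_map_pyRange_mem {β : Type} (f : Int → β) (n : Nat) (d : β)
    (i : Int) (hi : i ∈ PySem.List.pyRange 0 (n : Int)) :
    PySem.List.pyGetD ((PySem.List.pyRange 0 (n : Int)).map f) i d = f i := by
  rw [PySem.List.mem_pyRange_one] at hi
  obtain ⟨h0, h1⟩ := hi
  have hk : i = ((i.toNat : Nat) : Int) := by omega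
  rw [hk]
  exact PySem.List.pyGetD_map_pyRange f n i.toNat d (by omega)

theorem B_fold (n : Nat) (rows : List (List String)) (f : Int → Int) :
    List.foldl
      (fun res row =>
        (PySem.List.pyRange 0 (n : Int)).map (fun i =>
          if PySem.Str.len (PySem.List.pyGetD row i "") > PySem.List.pyGetD res i 0
          then PySem.Str.len (PySem.List.pyGetD row i "")
          else PySem.List.pyGetD res i 0))
      ((PySem.List.pyRange 0 (n : Int)).map f) rows =
    (PySem.List.pyRange 0 (n : Int)).map (fun i => pvColMax rows i (f i)) := by
  induction rows generalizing f with
  | nil => simp [pvColMax]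
  | cons row rows ih =>
    rw [List.foldl_cons]
    have hstep :
        ((PySem.List.pyRange 0 (n : Int)).map (fun i =>
          if PySem.Str.len (PySem.List.pyGetD row i "") >
              PySem.List.pyGetD ((PySem.List.pyRange 0 (n : Int)).map f) i 0
          then PySem.Str.len (PySem.List.pyGetD row i "")
          else PySem.List.pyGetD ((PySem.List.pyRange 0 (n : Int)).map f) i 0)) =
        (PySem.List.pyRange 0 (n : Int)).map (fun i =>
          if PySem.Str.len (PySem.List.pyGetD row i "") > f i
          then PySem.Str.len (PySem.List.pyGetD row i "") else f i) := by
      refine List.map_congr_left (fun i hi => ?_)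
      rw [pyGetD_map_pyRange_mem f n 0 i hi]
    rw [hstep, ih]
    rfl

theorem B_eq_map (data : List (List String)) :
    panjangMaksKolomTabel_alt data =
      (PySem.List.pyRange 0 ((PySem.List.pyGetD data 0 []).length : Int)).map
        (fun i => pvColMax data i 0) := by
  show List.foldl _ (List.replicate (PySem.List.pyGetD data 0 []).length 0) data = _
  have hrep : List.replicate (PySem.List.pyGetD data 0 []).length (0 : Int) =
      (PySem.List.pyRange 0 ((PySem.List.pyGetD data 0 []).length : Int)).map
        (fun _ => (0 : Int)) := by
    rw [List.map_const', PySem.List.length_pyRange_one]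
    simp
  rw [hrep]
  exact B_fold (PySem.List.pyGetD data 0 []).length data (fun _ => 0)

-- ===== VERDICT (by name: the statement is the Claim_ definition above) =====
theorem panjangMaksKolomTabel_spec : Claim_equal_panjangMaksKolomTabel := by
  intro data _ _
  unfold Spec_panjangMaksKolomTabel
  rw [A_eq_map, B_eq_map]
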